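-- pv_equiv track=rewrite | github.com/phoenix-agents/phoenix-core | memory_manager.py | _parse_skill_entry
-- ===== SOURCE A (Python) =====
-- from typing import Dict, Any, List, Optional, Callable
--
-- def _parse_skill_entry(entry: str) -> Dict[str, Any]:
--     """Parse a raw skill entry into structured format."""
--     lines = entry.strip().split('\n')
--     skill = {'name': '', 'description': '', 'triggers': '', 'steps': '', 'examples': ''}
--
--     for line in lines:
--         line = line.strip()
--         if line.startswith('[SKILL]'):
--             skill['name'] = line[7:].strip()
--         elif line.startswith('Description:'):
--             skill['description'] = line[12:].strip()
--         elif line.startswith('Triggers:'):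
--             skill['triggers'] = line[9:].strip()
--         elif line.startswith('Steps:'):
--             skill['steps'] = line[6:].strip()
--         elif line.startswith('Examples:'):
--             skill['examples'] = line[9:].strip()
--
--     return skill
-- ===== SOURCE B (Python) =====
-- def _parse_skill_entry(entry: str):
--     """Parse a raw skill entry into structured format."""
--     lines = [line.strip() for line in entry.strip().split('\n')]
--     fields = [('name', '[SKILL]'), ('description', 'Description:'),
--               ('triggers', 'Triggers:'), ('steps', 'Steps:'),
--               ('examples', 'Examples:')]
--     skill = {}
--     for field, prefix in fields:
--         value = ''
--         for line in reversed(lines):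
--             if line.startswith(prefix):
--                 value = line[len(prefix):].strip()
--                 break
--         skill[field] = value
--     return skill
-- ===== Notes on version B (the rewrite author's own statement) =====
-- stated objective: alternative
-- what changed: Replaces A's per-line if/elif ladder over a mutable dict by a data-driven per-field pass: for each (field, prefix) pair in a table, scan the stripped lines backwards and take the first (i.e. last) matching line's suffix.
import Mathlib
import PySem

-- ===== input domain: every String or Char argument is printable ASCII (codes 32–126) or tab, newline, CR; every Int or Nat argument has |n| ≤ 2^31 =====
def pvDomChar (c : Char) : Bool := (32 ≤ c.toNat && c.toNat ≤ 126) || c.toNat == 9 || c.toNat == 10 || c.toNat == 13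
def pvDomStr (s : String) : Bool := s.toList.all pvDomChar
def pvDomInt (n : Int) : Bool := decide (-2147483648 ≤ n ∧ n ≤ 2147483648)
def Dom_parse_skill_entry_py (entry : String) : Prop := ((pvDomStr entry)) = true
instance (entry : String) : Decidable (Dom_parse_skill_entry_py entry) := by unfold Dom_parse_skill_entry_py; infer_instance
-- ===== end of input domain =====

-- B replaces A's per-line if/elif ladder by a per-field backward scan (last matching line wins,
-- found as the first match from the end) over pre-stripped lines; objective: alternative/idiomatic.

-- ===== PORT A =====
-- literal transliteration of A: split into lines, fold the if/elif ladder over a 5-key dict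
def parse_skill_entry_py (entry : String) : List (String × String) :=
  let lines := (PySem.Str.split? (PySem.Str.strip entry) "\n").getD []  -- sep "\n" ≠ "", never none
  let init : PySem.Dict String String :=
    PySem.Dict.mk [("name",""),("description",""),("triggers",""),("steps",""),("examples","")]
  (lines.foldl (fun skill line0 =>
    let line := PySem.Str.strip line0
    if PySem.Str.startswith line "[SKILL]" then
      skill.insert "name" (PySem.Str.strip (PySem.Str.slice line (some 7) none))
    else if PySem.Str.startswith line "Description:" then
      skill.insert "description" (PySem.Str.strip (PySem.Str.slice line (some 12) none))
    else if PySem.Str.startswith line "Triggers:" then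
      skill.insert "triggers" (PySem.Str.strip (PySem.Str.slice line (some 9) none))
    else if PySem.Str.startswith line "Steps:" then
      skill.insert "steps" (PySem.Str.strip (PySem.Str.slice line (some 6) none))
    else if PySem.Str.startswith line "Examples:" then
      skill.insert "examples" (PySem.Str.strip (PySem.Str.slice line (some 9) none))
    else skill) init).items

-- ===== PORT B =====
-- B helper: `for line in reversed(lines): if line.startswith(prefix): value = …; break` with value = '' if no match
def pvFindBack (pfx : String) : List String → String
  | [] => ""
  | l :: ls =>
    if PySem.Str.startswith l pfx then
      PySem.Str.strip (PySem.Str.slice l (some (PySem.Str.len pfx)) none)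
    else pvFindBack pfx ls

def parse_skill_entry_py_alt (entry : String) : List (String × String) :=
  let lines := ((PySem.Str.split? (PySem.Str.strip entry) "\n").getD []).map PySem.Str.strip
  let fields : List (String × String) :=
    [("name","[SKILL]"), ("description","Description:"), ("triggers","Triggers:"),
     ("steps","Steps:"), ("examples","Examples:")]
  (fields.foldl (fun skill fp => skill.insert fp.1 (pvFindBack fp.2 lines.reverse))
    (PySem.Dict.mk [])).items

-- ===== PRECONDITION & SPEC =====
def Spec_parse_skill_entry_py (entry : String) (out : List (String × String)) : Prop := out = parse_skill_entry_py_alt entry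
instance (entry : String) (out : List (String × String)) : Decidable (Spec_parse_skill_entry_py entry out) := by unfold Spec_parse_skill_entry_py; infer_instance

-- ===== CLAIM (what is proved, stated in full; the proofs are below) =====
def Claim_equal_parse_skill_entry_py : Prop := ∀ (entry : String), Dom_parse_skill_entry_py entry → Spec_parse_skill_entry_py entry (parse_skill_entry_py entry)

-- ===== LEMMAS AND PROOFS =====

-- two nonempty prefixes with distinct first characters cannot both start a string
theorem pv_sw_excl {s pa qa : String}
    (hne : pa.toList.head? ≠ qa.toList.head?)
    (hp : pa.toList ≠ []) (hq : qa.toList ≠ [])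
    (h : PySem.Str.startswith s pa = true) : PySem.Str.startswith s qa = false := by
  simp only [PySem.Str.startswith_eq] at *
  rw [PySem.Chars.startswith_iff] at h
  rw [← Bool.not_eq_true, PySem.Chars.startswith_iff]
  intro hpre
  obtain ⟨t, ht⟩ := h
  obtain ⟨u, hu⟩ := hpre
  apply hne
  cases hP : pa.toList with
  | nil => exact absurd hP hp
  | cons a as =>
    cases hQ : qa.toList with
    | nil => exact absurd hQ hq
    | cons b bs =>
      rw [hP] at ht; rw [hQ] at hu
      have : s.toList.head? = some a := by rw [← ht]; rfl
      have hb : s.toList.head? = some b := by rw [← hu]; rfl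
      simp [this] at hb
      simp [hb]

-- the value B's backward scan yields, as an Option (first match in the given list)
def pvFM (pfx : String) (off : Int) : List String → Option String
  | [] => none
  | l :: ls => if PySem.Str.startswith l pfx then
      some (PySem.Str.strip (PySem.Str.slice l (some off) none))
    else pvFM pfx off ls

theorem pvFindBack_eq_pvFM (pfx : String) (ls : List String) :
    pvFindBack pfx ls = (pvFM pfx (PySem.Str.len pfx) ls).getD "" := by
  induction ls with
  | nil => rfl
  | cons l ls ih =>
    show (if PySem.Str.startswith l pfx then _ else _) = _
    unfold pvFM
    by_cases h : PySem.Str.startswith l pfx = true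
    · rw [if_pos h, if_pos h, Option.getD_some]
    · rw [if_neg h, if_neg h]; exact ih

theorem pvFM_append (pfx : String) (off : Int) (ys : List String) (l : String) :
    pvFM pfx off (ys ++ [l]) =
      ((pvFM pfx off ys).or (if PySem.Str.startswith l pfx then
        some (PySem.Str.strip (PySem.Str.slice l (some off) none)) else none)) := by
  induction ys with
  | nil =>
    show pvFM pfx off [l] = _
    unfold pvFM
    by_cases h : PySem.Str.startswith l pfx = true
    · rw [if_pos h, if_pos h]; rfl
    · rw [if_neg h, if_neg h]; rfl
  | cons y ys ih =>
    show pvFM pfx off (y :: (ys ++ [l])) = _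
    unfold pvFM
    by_cases h : PySem.Str.startswith y pfx = true
    · rw [if_pos h, if_pos h]; rfl
    · rw [if_neg h, if_neg h]; exact ih

-- A's forward accumulation of one field (last matching line wins), over raw lines
def pvFwd (pfx : String) (off : Int) : List String → String → String
  | [], v => v
  | l :: ls, v =>
    pvFwd pfx off ls
      (if PySem.Str.startswith (PySem.Str.strip l) pfx then
        PySem.Str.strip (PySem.Str.slice (PySem.Str.strip l) (some off) none) else v)

theorem pvFwd_eq_pvFM (pfx : String) (off : Int) (lines : List String) (v : String) :
    pvFwd pfx off lines v = (pvFM pfx off ((lines.map PySem.Str.strip).reverse)).getD v := by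
  induction lines generalizing v with
  | nil => rfl
  | cons l ls ih =>
    show pvFwd pfx off ls _ = _
    rw [ih, List.map_cons, List.reverse_cons, pvFM_append]
    cases hfm : pvFM pfx off ((ls.map PySem.Str.strip).reverse) with
    | some w => rfl
    | none =>
      by_cases h : PySem.Str.startswith (PySem.Str.strip l) pfx = true
      · rw [if_pos h, if_pos h]; rfl
      · rw [if_neg h, if_neg h]; rfl

-- insertion into the 5-key literal dict, field by field
theorem pv_ins1 (v1 v2 v3 v4 v5 w : String) : (PySem.Dict.mk [("name",v1),("description",v2),("triggers",v3),("steps",v4),("examples",v5)]).insert "name" w = PySem.Dict.mk [("name",w),("description",v2),("triggers",v3),("steps",v4),("examples",v5)] := by simp [PySem.Dict.insert]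
theorem pv_ins2 (v1 v2 v3 v4 v5 w : String) : (PySem.Dict.mk [("name",v1),("description",v2),("triggers",v3),("steps",v4),("examples",v5)]).insert "description" w = PySem.Dict.mk [("name",v1),("description",w),("triggers",v3),("steps",v4),("examples",v5)] := by simp [PySem.Dict.insert]
theorem pv_ins3 (v1 v2 v3 v4 v5 w : String) : (PySem.Dict.mk [("name",v1),("description",v2),("triggers",v3),("steps",v4),("examples",v5)]).insert "triggers" w = PySem.Dict.mk [("name",v1),("description",v2),("triggers",w),("steps",v4),("examples",v5)] := by simp [PySem.Dict.insert]
theorem pv_ins4 (v1 v2 v3 v4 v5 w : String) : (PySem.Dict.mk [("name",v1),("description",v2),("triggers",v3),("steps",v4),("examples",v5)]).insert "steps" w = PySem.Dict.mk [("name",v1),("description",v2),("triggers",v3),("steps",w),("examples",v5)] := by simp [PySem.Dict.insert]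
theorem pv_ins5 (v1 v2 v3 v4 v5 w : String) : (PySem.Dict.mk [("name",v1),("description",v2),("triggers",v3),("steps",v4),("examples",v5)]).insert "examples" w = PySem.Dict.mk [("name",v1),("description",v2),("triggers",v3),("steps",v4),("examples",w)] := by simp [PySem.Dict.insert]

-- the fold of A's ladder, characterised field by field via pvFwd
theorem pv_foldA (lines : List String) (v1 v2 v3 v4 v5 : String) :
    (lines.foldl (fun skill line0 =>
      let line := PySem.Str.strip line0
      if PySem.Str.startswith line "[SKILL]" then
        skill.insert "name" (PySem.Str.strip (PySem.Str.slice line (some 7) none))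
      else if PySem.Str.startswith line "Description:" then
        skill.insert "description" (PySem.Str.strip (PySem.Str.slice line (some 12) none))
      else if PySem.Str.startswith line "Triggers:" then
        skill.insert "triggers" (PySem.Str.strip (PySem.Str.slice line (some 9) none))
      else if PySem.Str.startswith line "Steps:" then
        skill.insert "steps" (PySem.Str.strip (PySem.Str.slice line (some 6) none))
      else if PySem.Str.startswith line "Examples:" then
        skill.insert "examples" (PySem.Str.strip (PySem.Str.slice line (some 9) none))
      else skill)
      (PySem.Dict.mk [("name",v1),("description",v2),("triggers",v3),("steps",v4),("examples",v5)])) =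
    PySem.Dict.mk [("name", pvFwd "[SKILL]" 7 lines v1),
                   ("description", pvFwd "Description:" 12 lines v2),
                   ("triggers", pvFwd "Triggers:" 9 lines v3),
                   ("steps", pvFwd "Steps:" 6 lines v4),
                   ("examples", pvFwd "Examples:" 9 lines v5)] := by
  induction lines generalizing v1 v2 v3 v4 v5 with
  | nil => rfl
  | cons l ls ih =>
    rw [List.foldl_cons]
    show List.foldl _ (if PySem.Str.startswith (PySem.Str.strip l) "[SKILL]" then _ else _) _ = _
    simp only [pvFwd]
    by_cases h1 : PySem.Str.startswith (PySem.Str.strip l) "[SKILL]" = true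
    · have e2 := pv_sw_excl (pa := "[SKILL]") (qa := "Description:") (by decide) (by decide) (by decide) h1
      have e3 := pv_sw_excl (pa := "[SKILL]") (qa := "Triggers:") (by decide) (by decide) (by decide) h1
      have e4 := pv_sw_excl (pa := "[SKILL]") (qa := "Steps:") (by decide) (by decide) (by decide) h1
      have e5 := pv_sw_excl (pa := "[SKILL]") (qa := "Examples:") (by decide) (by decide) (by decide) h1
      rw [if_pos h1, if_pos h1, if_neg (by simp only [e2]; exact Bool.false_ne_true), if_neg (by simp only [e3]; exact Bool.false_ne_true),
          if_neg (by simp only [e4]; exact Bool.false_ne_true), if_neg (by simp only [e5]; exact Bool.false_ne_true), pv_ins1, ih]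
    · rw [if_neg h1, if_neg h1]
      by_cases h2 : PySem.Str.startswith (PySem.Str.strip l) "Description:" = true
      · have e3 := pv_sw_excl (pa := "Description:") (qa := "Triggers:") (by decide) (by decide) (by decide) h2
        have e4 := pv_sw_excl (pa := "Description:") (qa := "Steps:") (by decide) (by decide) (by decide) h2
        have e5 := pv_sw_excl (pa := "Description:") (qa := "Examples:") (by decide) (by decide) (by decide) h2
        rw [if_pos h2, if_pos h2, if_neg (by simp only [e3]; exact Bool.false_ne_true), if_neg (by simp only [e4]; exact Bool.false_ne_true),
            if_neg (by simp only [e5]; exact Bool.false_ne_true), pv_ins2, ih]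
      · rw [if_neg h2, if_neg h2]
        by_cases h3 : PySem.Str.startswith (PySem.Str.strip l) "Triggers:" = true
        · have e4 := pv_sw_excl (pa := "Triggers:") (qa := "Steps:") (by decide) (by decide) (by decide) h3
          have e5 := pv_sw_excl (pa := "Triggers:") (qa := "Examples:") (by decide) (by decide) (by decide) h3
          rw [if_pos h3, if_pos h3, if_neg (by simp only [e4]; exact Bool.false_ne_true), if_neg (by simp only [e5]; exact Bool.false_ne_true), pv_ins3, ih]
        · rw [if_neg h3, if_neg h3]
          by_cases h4 : PySem.Str.startswith (PySem.Str.strip l) "Steps:" = true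
          · have e5 := pv_sw_excl (pa := "Steps:") (qa := "Examples:") (by decide) (by decide) (by decide) h4
            rw [if_pos h4, if_pos h4, if_neg (by simp only [e5]; exact Bool.false_ne_true), pv_ins4, ih]
          · rw [if_neg h4, if_neg h4]
            by_cases h5 : PySem.Str.startswith (PySem.Str.strip l) "Examples:" = true
            · rw [if_pos h5, if_pos h5, pv_ins5, ih]
            · rw [if_neg h5, if_neg h5, ih]

-- ===== VERDICT (by name: the statement is the Claim_ definition above) =====
theorem parse_skill_entry_py_spec : Claim_equal_parse_skill_entry_py := by
  intro entry _
  unfold Spec_parse_skill_entry_py parse_skill_entry_py parse_skill_entry_py_alt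
  simp only [pv_foldA]
  simp only [List.foldl_cons, List.foldl_nil, pvFindBack_eq_pvFM]
  rw [show (PySem.Str.len "[SKILL]") = 7 from by decide,
      show (PySem.Str.len "Description:") = 12 from by decide,
      show (PySem.Str.len "Triggers:") = 9 from by decide,
      show (PySem.Str.len "Steps:") = 6 from by decide,
      show (PySem.Str.len "Examples:") = 9 from by decide]
  simp only [pvFwd_eq_pvFM]
  simp [PySem.Dict.insert]
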